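-- pv_equiv track=rewrite | github.com/alexandraback/datacollection | solutions_5644738749267968_0/Python/daveagp/War.py | lie
-- ===== SOURCE A (Python) =====
-- def lie(N, K):
--     K.sort()
--     N = set(N)
--     score = 0
--     for k in K:
--         mincover = 100
--         for n in N:
--             if n>k and n<mincover: mincover=n
--         if mincover == 100: break
--         N.remove(mincover)
--         score += 1
--     return score
-- ===== SOURCE B (Python) =====
-- def lie(N, K):
--     # Two-pointer: sort unique N ascending; for each k (ascending) take the
--     # smallest still-unused n > k.  Mutates K in place (K.sort()) like A.
--     K.sort()
--     ns = sorted(set(N))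
--     i = 0
--     score = 0
--     for k in K:
--         while i < len(ns) and ns[i] <= k:
--             i += 1
--         if i == len(ns) or ns[i] >= 100:
--             break
--         i += 1
--         score += 1
--     return score
-- ===== Notes on version B (the rewrite author's own statement) =====
-- stated objective: faster
-- what changed: A rescans the whole remaining set of N for each k (quadratic); B sorts the distinct N once and walks a single two-pointer over sorted K and sorted unique N, so each element of N is visited at most once.
import Mathlib
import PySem

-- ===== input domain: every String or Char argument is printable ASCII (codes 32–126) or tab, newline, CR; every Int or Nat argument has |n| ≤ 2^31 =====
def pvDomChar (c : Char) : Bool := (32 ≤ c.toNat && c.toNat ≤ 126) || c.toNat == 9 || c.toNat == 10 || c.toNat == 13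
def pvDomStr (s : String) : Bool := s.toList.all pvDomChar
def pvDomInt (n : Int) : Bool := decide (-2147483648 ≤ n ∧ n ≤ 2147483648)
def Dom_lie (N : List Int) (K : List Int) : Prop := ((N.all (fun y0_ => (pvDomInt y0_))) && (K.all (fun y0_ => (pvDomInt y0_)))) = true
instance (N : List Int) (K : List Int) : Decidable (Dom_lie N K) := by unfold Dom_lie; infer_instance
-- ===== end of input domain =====

-- B replaces A's per-k rescan of the whole remaining set with one two-pointer sweep
-- over sorted unique N (objective: faster, asymptotic). Both A and B sort K in place;
-- the equivalence proved here is about the return value.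

-- ===== PORT A =====
-- inner loop: 'for n in N: if n>k and n<mincover: mincover=n' starting at 100
-- (a minimum over the set, so Python's set iteration order cannot affect it)
def lieInner (Ns : List Int) (k : Int) : Int :=
  Ns.foldl (fun m n => if n > k ∧ n < m then n else m) 100

-- outer loop over sorted K with the remaining set and score as state; 'break' = return score.
-- N.remove(mincover): Set.remove? never returns none here (mincover ≠ 100 means it was
-- assigned from an element of Ns); .getD Ns is the total form of that never-raising call.
def lieLoop : List Int → PySem.Set Int → Int → Int
  | [], _, score => score
  | k :: ks, Ns, score =>
    let mincover := lieInner Ns k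
    if mincover = 100 then score
    else lieLoop ks ((PySem.Set.remove? Ns mincover).getD Ns) (score + 1)

def lie (N : List Int) (K : List Int) : Int :=
  lieLoop (PySem.List.sorted K (fun x => x) false) (PySem.Set.ofList N) 0

-- ===== PORT B =====
-- 'while i < len(ns) and ns[i] <= k: i += 1' = dropWhile (· ≤ k) on the remaining suffix
def lieAltLoop : List Int → List Int → Int → Int
  | [], _, score => score
  | k :: ks, ns, score =>
    match ns.dropWhile (fun n => decide (n ≤ k)) with
    | [] => score
    | n :: rest => if n ≥ 100 then score else lieAltLoop ks rest (score + 1)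

def lie_alt (N : List Int) (K : List Int) : Int :=
  lieAltLoop (PySem.List.sorted K (fun x => x) false)
             (PySem.List.sorted (PySem.Set.ofList N) (fun x => x) false) 0

-- ===== PRECONDITION & SPEC =====
def Spec_lie (N : List Int) (K : List Int) (out : Int) : Prop := out = lie_alt N K
instance (N : List Int) (K : List Int) (out : Int) : Decidable (Spec_lie N K out) := by unfold Spec_lie; infer_instance

-- ===== CLAIM (what is proved, stated in full; the proofs are below) =====
def Claim_equal_lie : Prop := ∀ (N : List Int) (K : List Int), Dom_lie N K → Spec_lie N K (lie N K)

-- ===== LEMMAS AND PROOFS =====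

-- the inner fold is a guarded running minimum
theorem lieInner_fold_spec (k : Int) :
    ∀ (l : List Int) (m : Int),
      (l.foldl (fun m n => if n > k ∧ n < m then n else m) m = m ∨
        (l.foldl (fun m n => if n > k ∧ n < m then n else m) m ∈ l ∧
          k < l.foldl (fun m n => if n > k ∧ n < m then n else m) m)) ∧
      l.foldl (fun m n => if n > k ∧ n < m then n else m) m ≤ m ∧
      (∀ n ∈ l, k < n → l.foldl (fun m n => if n > k ∧ n < m then n else m) m ≤ n) := by
  intro l
  induction l with
  | nil => intro m; simp
  | cons a t ih =>
    intro m
    simp only [List.foldl_cons]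
    by_cases hc : a > k ∧ a < m
    · rw [if_pos hc]
      rcases ih a with ⟨h1, h2, h3⟩
      refine ⟨?_, by omega, ?_⟩
      · rcases h1 with h | ⟨hm, hk⟩
        · right; rw [h]; exact ⟨List.mem_cons_self .., hc.1⟩
        · right; exact ⟨List.mem_cons_of_mem _ hm, hk⟩
      · intro n hn hkn
        rcases List.mem_cons.mp hn with rfl | hn'
        · omega
        · exact h3 n hn' hkn
    · rw [if_neg hc]
      rcases ih m with ⟨h1, h2, h3⟩
      refine ⟨?_, h2, ?_⟩
      · rcases h1 with h | ⟨hm, hk⟩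
        · left; exact h
        · right; exact ⟨List.mem_cons_of_mem _ hm, hk⟩
      · intro n hn hkn
        rcases List.mem_cons.mp hn with rfl | hn'
        · rcases not_and_or.mp hc with h | h <;> omega
        · exact h3 n hn' hkn

theorem lieInner_spec (Ns : List Int) (k : Int) :
    (lieInner Ns k = 100 ∨ (lieInner Ns k ∈ Ns ∧ k < lieInner Ns k)) ∧
      lieInner Ns k ≤ 100 ∧ (∀ n ∈ Ns, k < n → lieInner Ns k ≤ n) := by
  unfold lieInner
  exact lieInner_fold_spec k Ns 100

theorem mem_dropWhile_of_not (k : Int) :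
    ∀ (l : List Int) (x : Int), x ∈ l → ¬ x ≤ k →
      x ∈ l.dropWhile (fun n => decide (n ≤ k)) := by
  intro l
  induction l with
  | nil => simp
  | cons a t ih =>
    intro x hx hxk
    by_cases ha : a ≤ k
    · rw [List.dropWhile_cons_of_pos (by simpa using ha)]
      rcases List.mem_cons.mp hx with rfl | h
      · exact absurd ha hxk
      · exact ih x h hxk
    · rw [List.dropWhile_cons_of_neg (by simpa using ha)]
      exact hx

theorem mem_of_mem_dropWhile {l : List Int} {p : Int → Bool} {x : Int}
    (h : x ∈ l.dropWhile p) : x ∈ l :=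
  (List.dropWhile_sublist (l := l) (p := p)).mem h

theorem dropWhile_nil_all {l : List Int} {k : Int}
    (h : l.dropWhile (fun n => decide (n ≤ k)) = []) : ∀ x ∈ l, x ≤ k := by
  intro x hx
  have := (List.dropWhile_eq_nil_iff).mp h x hx
  simpa using this

-- main induction: A's loop over the set equals B's two-pointer sweep, under the
-- invariant that ns is strictly sorted and agrees with Ns above every coming k.
theorem loop_eq :
    ∀ (ks Ns ns : List Int) (s : Int),
      ks.Pairwise (· ≤ ·) → ns.Pairwise (· < ·) → Ns.Nodup →
      (∀ x k', k' ∈ ks → k' < x → (x ∈ ns ↔ x ∈ Ns)) →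
      lieLoop ks Ns s = lieAltLoop ks ns s := by
  intro ks
  induction ks with
  | nil => intro Ns ns s _ _ _ _; rfl
  | cons k kt ih =>
    intro Ns ns s hks hns hnd hmem
    have hks' := List.pairwise_cons.mp hks
    obtain ⟨h1, h2, h3⟩ := lieInner_spec Ns k
    rcases hd : ns.dropWhile (fun n => decide (n ≤ k)) with _ | ⟨n, rest⟩
    · -- no element of ns exceeds k ⇒ mincover = 100, both break
      have hmc : lieInner Ns k = 100 := by
        rcases h1 with h | ⟨hm, hk⟩
        · exact h
        · have hin : lieInner Ns k ∈ ns := (hmem _ k (List.mem_cons_self ..) hk).mpr hm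
          have hle := dropWhile_nil_all hd _ hin
          omega
      simp [lieLoop, lieAltLoop, hd, hmc]
    · -- n is the least element of ns above k
      have hdsub : (n :: rest).Sublist ns := hd ▸ List.dropWhile_sublist ..
      have hdpw : (n :: rest).Pairwise (· < ·) := hns.sublist hdsub
      have hnk : ¬ n ≤ k := by
        have := List.head_dropWhile_not (p := fun n => decide (n ≤ k)) (l := ns) (by simp [hd])
        simpa [hd] using this
      have hnns : n ∈ ns := mem_of_mem_dropWhile (hd ▸ List.mem_cons_self ..)
      have hnNs : n ∈ Ns := (hmem n k (List.mem_cons_self ..) (by omega)).mp hnns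
      have hmin : ∀ x ∈ ns, k < x → n ≤ x := by
        intro x hx hkx
        have hxd : x ∈ n :: rest := hd ▸ mem_dropWhile_of_not k ns x hx (by omega)
        rcases List.mem_cons.mp hxd with rfl | hx'
        · omega
        · exact le_of_lt ((List.pairwise_cons.mp hdpw).1 x hx')
      by_cases h100 : n ≥ 100
      · -- smallest candidate is ≥ 100 ⇒ mincover = 100, both break
        have hmc : lieInner Ns k = 100 := by
          rcases h1 with h | ⟨hm, hk⟩
          · exact h
          · have hin : lieInner Ns k ∈ ns := (hmem _ k (List.mem_cons_self ..) hk).mpr hm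
            have := hmin _ hin hk
            omega
        simp [lieLoop, lieAltLoop, hd, hmc, h100]
      · -- mincover = n < 100; both take it and recurse
        have hle : lieInner Ns k ≤ n := h3 n hnNs (by omega)
        have hmc : lieInner Ns k = n := by
          rcases h1 with h | ⟨hm, hk⟩
          · omega
          · have hin : lieInner Ns k ∈ ns := (hmem _ k (List.mem_cons_self ..) hk).mpr hm
            have := hmin _ hin hk
            omega
        have hrem : (PySem.Set.remove? Ns n).getD Ns = PySem.Set.discard Ns n := by
          rw [PySem.Set.remove?_of_mem hnNs]; rfl
        have hrec := ih (PySem.Set.discard Ns n) rest (s + 1) hks'.2 (List.pairwise_cons.mp hdpw).2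
          (PySem.Set.nodup_discard Ns n hnd) ?_
        · simp only [lieLoop, lieAltLoop, hd, hmc]
          rw [if_neg (by omega), if_neg (by omega), hrem, hrec]
        · intro x k' hk' hkx
          have hkk : k ≤ k' := hks'.1 k' hk'
          constructor
          · intro hxr
            have hxns : x ∈ ns := mem_of_mem_dropWhile (hd ▸ List.mem_cons_of_mem n hxr)
            have hxn : x ≠ n := by
              have := (List.pairwise_cons.mp hdpw).1 x hxr; omega
            exact (PySem.Set.mem_discard Ns n x).mpr ⟨(hmem x k' (List.mem_cons_of_mem _ hk') hkx).mp hxns, hxn⟩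
          · intro hxe
            obtain ⟨hxNs, hxn⟩ := (PySem.Set.mem_discard Ns n x).mp hxe
            have hxns : x ∈ ns := (hmem x k' (List.mem_cons_of_mem _ hk') hkx).mpr hxNs
            have hxd : x ∈ n :: rest := hd ▸ mem_dropWhile_of_not k ns x hxns (by omega)
            rcases List.mem_cons.mp hxd with rfl | h
            · exact absurd rfl hxn
            · exact h

-- ===== VERDICT (by name: the statement is the Claim_ definition above) =====
theorem lie_spec : Claim_equal_lie := by
  intro N K _
  unfold Spec_lie lie lie_alt
  apply loop_eq
  · have := PySem.List.sorted_pairwise (xs := K) (key := fun x => x)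
    simpa using this
  · exact PySem.List.sorted_ofList_pairwise_lt (xs := N)
  · exact PySem.Set.nodup_ofList N
  · intro x k' _ _
    simp [PySem.List.mem_sorted]
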